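-- pv_equiv track=rewrite | github.com/AndrewDul/smart-desk-ai-assistant | modules/runtime/voice_engine_v2/vosk_fixture_report_summary.py | _count_by_key
-- ===== SOURCE A (Python) =====
-- from typing import Any
--
-- def _count_by_key(records: list[dict[str, Any]], key: str) -> dict[str, int]:
--     counts: dict[str, int] = {}
--     for record in records:
--         value = record.get(key)
--         if value is None:
--             continue
--         value_key = str(value)
--         counts[value_key] = counts.get(value_key, 0) + 1
--     return dict(sorted(counts.items()))
-- ===== SOURCE B (Python) =====
-- from itertools import groupby
--
--
-- def _count_by_key(records, key):
--     values = sorted(str(v) for record in records if (v := record.get(key)) is not None)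
--     return {k: sum(1 for _ in g) for k, g in groupby(values)}
-- ===== Notes on version B (the rewrite author's own statement) =====
-- stated objective: alternative
-- what changed: B collects the stringified values, sorts them once, and counts equal runs in a single grouped pass (itertools.groupby), instead of accumulating a hash-map counter and sorting its items afterwards.
import Mathlib
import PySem

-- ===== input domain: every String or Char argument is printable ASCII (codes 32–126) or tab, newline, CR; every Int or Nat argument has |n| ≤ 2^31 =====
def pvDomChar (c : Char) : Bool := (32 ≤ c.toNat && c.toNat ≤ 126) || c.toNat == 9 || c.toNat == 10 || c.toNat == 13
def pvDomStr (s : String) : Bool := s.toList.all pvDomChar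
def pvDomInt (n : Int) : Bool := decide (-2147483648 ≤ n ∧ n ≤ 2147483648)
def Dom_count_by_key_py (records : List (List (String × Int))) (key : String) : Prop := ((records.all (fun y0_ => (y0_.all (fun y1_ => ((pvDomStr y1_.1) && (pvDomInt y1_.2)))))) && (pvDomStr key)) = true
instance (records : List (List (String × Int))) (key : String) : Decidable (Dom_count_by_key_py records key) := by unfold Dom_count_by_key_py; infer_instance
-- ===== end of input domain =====

-- B sorts the stringified values once and counts equal runs in one grouped pass (groupby),
-- instead of A's hash-map counter that is sorted afterwards; alternative decomposition, same results.

-- ===== PORT A =====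
def count_by_key_py (records : List (List (String × Int))) (key : String) : List (String × Int) :=
  let counts : PySem.Dict String Int :=
    records.foldl (fun counts record =>
      match (PySem.Dict.mk record).get? key with
      | none => counts            -- value is None: continue
      | some value =>
        let value_key := PySem.Int.toStr value
        counts.insert value_key (counts.getD value_key 0 + 1)) PySem.Dict.empty
  -- dict(sorted(counts.items())): sorted by the (key, count) tuple
  PySem.List.sorted2 counts.items (fun p => p.1) (fun p => p.2)

-- ===== PORT B =====
-- port of itertools.groupby consumption over a list: one (key, run-length) pair per maximal run
def groupCounts : List String → List (String × Int)
  | [] => []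
  | x :: xs =>
    (x, 1 + ((xs.takeWhile (· == x)).length : Int)) :: groupCounts (xs.dropWhile (· == x))
termination_by l => l.length
decreasing_by
  simp only [List.length_cons]
  exact Nat.lt_succ_of_le (List.length_dropWhile_le _ _)

def count_by_key_py_alt (records : List (List (String × Int))) (key : String) : List (String × Int) :=
  let values := PySem.List.sorted
    (records.filterMap (fun record =>
      ((PySem.Dict.mk record).get? key).map (fun v => PySem.Int.toStr v)))
    (fun x => x)
  groupCounts values

-- ===== PRECONDITION & SPEC =====
def Spec_count_by_key_py (records : List (List (String × Int))) (key : String) (out : List (String × Int)) : Prop := out = count_by_key_py_alt records key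
instance (records : List (List (String × Int))) (key : String) (out : List (String × Int)) : Decidable (Spec_count_by_key_py records key out) := by unfold Spec_count_by_key_py; infer_instance

-- ===== CLAIM (what is proved, stated in full; the proofs are below) =====
def Claim_equal_count_by_key_py : Prop := ∀ (records : List (List (String × Int))) (key : String), Dom_count_by_key_py records key → Spec_count_by_key_py records key (count_by_key_py records key)

-- ===== LEMMAS AND PROOFS =====

-- A's loop (skip when the lookup misses, otherwise bump the stringified hit)
-- is the counting step folded over the filterMap of the stringified lookups.
lemma A_fold_eq (key : String) : ∀ (records : List (List (String × Int))) (d : PySem.Dict String Int),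
    records.foldl (fun counts record =>
      match (PySem.Dict.mk record).get? key with
      | none => counts
      | some value =>
        let value_key := PySem.Int.toStr value
        counts.insert value_key (counts.getD value_key 0 + 1)) d
    = (records.filterMap (fun record =>
        ((PySem.Dict.mk record).get? key).map (fun v => PySem.Int.toStr v))).foldl
        (fun d x => d.insert x (d.getD x 0 + 1)) d := by
  intro records
  induction records with
  | nil => intro d; rfl
  | cons r rs ih =>
    intro d
    cases hg : (PySem.Dict.mk r).get? key <;>
      simp [List.foldl_cons, hg, ih]

lemma insertBy_congr {α : Type} (b1 b2 : α → α → Bool) (x : α) :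
    ∀ (ys : List α), (∀ y ∈ ys, b1 x y = b2 x y) →
      PySem.List.insertBy b1 x ys = PySem.List.insertBy b2 x ys := by
  intro ys
  induction ys with
  | nil => intro _; rfl
  | cons y ys ih =>
    intro h
    simp only [PySem.List.insertBy]
    rw [h y (by simp)]
    by_cases hb : b2 x y = true
    · simp [hb]
    · simp [hb, ih (fun z hz => h z (by simp [hz]))]

lemma foldl_insertBy_congr {α : Type} (b1 b2 : α → α → Bool) :
    ∀ (xs acc : List α),
      (∀ a b, (a ∈ xs ∨ a ∈ acc) → (b ∈ xs ∨ b ∈ acc) → b1 a b = b2 a b) →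
      xs.foldl (fun acc x => PySem.List.insertBy b1 x acc) acc
        = xs.foldl (fun acc x => PySem.List.insertBy b2 x acc) acc := by
  intro xs
  induction xs with
  | nil => intro acc _; rfl
  | cons x xs ih =>
    intro acc h
    simp only [List.foldl_cons]
    rw [insertBy_congr b1 b2 x acc (fun y hy => h x y (Or.inl (by simp)) (Or.inr hy))]
    apply ih
    intro a b ha hb
    apply h a b
    · rcases ha with ha | ha
      · exact Or.inl (by simp [ha])
      · rcases (PySem.List.mem_insertBy b2 x a acc).1 ha with h' | h'
        · exact Or.inl (by simp [h'])
        · exact Or.inr h'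
    · rcases hb with hb | hb
      · exact Or.inl (by simp [hb])
      · rcases (PySem.List.mem_insertBy b2 x b acc).1 hb with h' | h'
        · exact Or.inl (by simp [h'])
        · exact Or.inr h'

-- sorting by the full (key, count) tuple equals sorting by the key alone
-- when no two list elements share a first component
lemma sorted2_eq_sorted_fst (items : List (String × Int))
    (hnd : (items.map Prod.fst).Nodup) :
    PySem.List.sorted2 items (fun p => p.1) (fun p => p.2)
      = PySem.List.sorted items (fun p => p.1) := by
  show items.foldl _ [] = items.foldl _ []
  apply foldl_insertBy_congr
  intro a b ha hb
  simp only [List.mem_nil_iff, or_false] at ha hb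
  by_cases hab : a.1 = b.1
  · have : a = b := List.inj_on_of_nodup_map hnd ha hb hab
    subst this
    simp
  · rcases lt_or_gt_of_ne hab with h | h
    · simp [h]
    · simp [h, lt_asymm h]

-- characterization of groupCounts on a ≤-sorted list:
-- strictly increasing keys, members are exactly the (value, multiplicity) pairs
lemma grp_spec : ∀ (s : List String), s.Pairwise (· ≤ ·) →
    (groupCounts s).Pairwise (fun a b => a.1 < b.1) ∧
    (∀ p : String × Int, p ∈ groupCounts s ↔ p.1 ∈ s ∧ p.2 = (s.count p.1 : Int)) := by
  intro s
  induction s using groupCounts.induct with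
  | case1 => exact fun _ => ⟨by simp [groupCounts], by simp [groupCounts]⟩
  | case2 x xs ih =>
    intro hp
    set a := xs.takeWhile (· == x) with ha
    set t := xs.dropWhile (· == x) with ht
    have hxs : xs = a ++ t := (List.takeWhile_append_dropWhile (p := (· == x)) (l := xs)).symm
    have hax : ∀ z ∈ a, z = x := by
      intro z hz
      have := List.mem_takeWhile_imp hz
      simpa using this
    have hxle : ∀ z ∈ xs, x ≤ z := by
      intro z hz
      exact (List.pairwise_cons.1 hp).1 z hz
    have htp : t.Pairwise (· ≤ ·) := by
      have h2 := hp.of_cons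
      rw [hxs] at h2
      exact h2.sublist (List.sublist_append_right a t)
    have hxt : ∀ z ∈ t, x < z := by
      cases htt : t with
      | nil => simp
      | cons y ys =>
        have hy : ¬ (y == x) = true := by
          have h3 := List.head?_dropWhile_not (fun z => z == x) xs
          rw [← ht, htt] at h3
          simpa using h3
        have hyx : x < y := by
          have hyle : x ≤ y := hxle y (by rw [hxs, htt]; simp)
          rcases lt_or_eq_of_le hyle with h | h
          · exact h
          · exact absurd (by simp [h.symm]) hy
        intro z hz
        have htp' := htp
        rw [htt] at htp'
        rcases List.mem_cons.1 hz with rfl | hz'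
        · exact hyx
        · exact lt_of_lt_of_le hyx ((List.pairwise_cons.1 htp').1 z hz')
    obtain ⟨ihp, ihm⟩ := ih htp
    have hxnt : x ∉ t := fun h => lt_irrefl x (hxt x h)
    have hcx : ((x :: xs).count x : Int) = 1 + (a.length : Int) := by
      have h4 : (x :: xs).count x = a.length + 1 := by
        rw [List.count_cons_self, hxs, List.count_append,
            List.count_eq_zero.2 hxnt,
            List.count_eq_length.2 (fun z hz => (hax z hz).symm)]
      rw [h4]; push_cast; ring
    have hct : ∀ k, k ∈ t → (x :: xs).count k = t.count k := by
      intro k hk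
      have hkx : k ≠ x := fun h => lt_irrefl x (h ▸ hxt k hk)
      rw [List.count_cons_of_ne (Ne.symm hkx), hxs, List.count_append,
          List.count_eq_zero.2 (fun h => hkx (hax k h)), Nat.zero_add]
    constructor
    · simp only [groupCounts]
      rw [← ha, ← ht]
      refine List.pairwise_cons.2 ⟨?_, ihp⟩
      intro p hp'
      exact hxt p.1 ((ihm p).1 hp').1
    · intro p
      simp only [groupCounts]
      rw [← ha, ← ht, List.mem_cons, ihm p]
      constructor
      · rintro (rfl | ⟨hm, hc⟩)
        · exact ⟨by simp, by rw [hcx]⟩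
        · exact ⟨by rw [hxs]; simp [hm], by rw [hct p.1 hm]; exact hc⟩
      · rintro ⟨hm, hc⟩
        by_cases hpx : p.1 = x
        · left
          have h5 : p.2 = 1 + (a.length : Int) := by
            rw [hc, hpx, hcx]
          exact Prod.ext hpx h5
        · right
          have hmt : p.1 ∈ t := by
            rcases List.mem_cons.1 hm with h | h
            · exact absurd h hpx
            · rw [hxs] at h
              rcases List.mem_append.1 h with h | h
              · exact absurd (hax _ h) hpx
              · exact h
          exact ⟨hmt, by rw [hc, hct p.1 hmt]⟩

-- ===== VERDICT (by name: the statement is the Claim_ definition above) =====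
theorem count_by_key_py_spec : Claim_equal_count_by_key_py := by
  intro records key _
  show count_by_key_py records key = count_by_key_py_alt records key
  unfold count_by_key_py count_by_key_py_alt
  simp only [A_fold_eq, PySem.Dict.foldl_insert_getD_add_one_eq_counter]
  set vs : List String := records.filterMap (fun record =>
      ((PySem.Dict.mk record).get? key).map (fun v => PySem.Int.toStr v)) with hvs
  set s : List String := PySem.List.sorted vs (fun x => x) with hs
  have hsp : s.Pairwise (· ≤ ·) := by
    have := PySem.List.sorted_pairwise vs (fun x => x)
    simpa using this
  have hperm : s.Perm vs := PySem.List.sorted_perm vs (fun x => x) false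
  obtain ⟨hgp, hgm⟩ := grp_spec s hsp
  have hnd : (((PySem.Dict.counter vs).items).map Prod.fst).Nodup := by
    rw [PySem.Dict.items_counter, List.map_map]
    have hid : (Prod.fst ∘ fun k => (k, (vs.count k : Int))) = id := rfl
    rw [hid, List.map_id]
    exact PySem.Set.nodup_ofList vs
  rw [sorted2_eq_sorted_fst _ hnd]
  apply PySem.List.sorted_eq_of_perm_of_pairwise_lt
  · rw [PySem.Dict.items_counter]
    apply (List.perm_ext_iff_of_nodup ?_ ?_).2
    · intro p
      rw [hgm p]
      constructor
      · rintro ⟨hm, hc⟩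
        refine List.mem_map.2 ⟨p.1, ?_, ?_⟩
        · exact (PySem.Set.mem_ofList vs p.1).2 (hperm.mem_iff.1 hm)
        · rw [← hperm.count_eq, ← hc]
      · intro h
        rcases List.mem_map.1 h with ⟨k, hk, rfl⟩
        refine ⟨?_, ?_⟩
        · exact hperm.mem_iff.2 ((PySem.Set.mem_ofList vs k).1 hk)
        · simp [hperm.count_eq]
    · have : (groupCounts s).Pairwise (· ≠ ·) :=
        hgp.imp (fun h he => by rw [he] at h; exact lt_irrefl _ h)
      exact this
    · apply List.Nodup.map
      · intro k1 k2 h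
        exact congrArg Prod.fst h
      · exact PySem.Set.nodup_ofList vs
  · exact hgp
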